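-- pv_equiv track=rewrite | github.com/rtmendes/mngr | libs/mng_tmr/imbue/mng_tmr/api.py | _sanitize_test_name_for_agent
-- ===== SOURCE A (Python) =====
-- def _sanitize_test_name_for_agent(test_node_id: str) -> str:
--     """Convert a pytest node ID into a valid agent name suffix.
--
--     Strips the file path prefix and replaces characters that are not valid in
--     agent names.
--     """
--     parts = test_node_id.split("::")
--     short_name = parts[-1] if parts else test_node_id
--     cleaned = ""
--     for ch in short_name:
--         if ch.isalnum() or ch == "-":
--             cleaned += ch
--         else:
--             cleaned += "-"
--     sanitized = ""
--     for ch in cleaned: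
--         if ch == "-" and sanitized.endswith("-"):
--             continue
--         sanitized += ch
--     return sanitized.strip("-").lower()[:40]
-- ===== SOURCE B (Python) =====
-- def _sanitize_test_name_for_agent(test_node_id: str) -> str:
--     """Single-pass tokenizer: collect maximal alphanumeric runs of the last
--     '::' component and join them with '-'; then lowercase and truncate."""
--     short_name = test_node_id.split("::")[-1]
--     tokens = []
--     cur = []
--     for ch in short_name:
--         if ch.isalnum():
--             cur.append(ch)
--         elif cur:
--             tokens.append("".join(cur))
--             cur = []
--     if cur:
--         tokens.append("".join(cur))
--     return "-".join(tokens).lower()[:40]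
-- ===== Notes on version B (the rewrite author's own statement) =====
-- stated objective: simpler
-- what changed: Replaces A's three sequential passes (map non-alnum to '-', collapse duplicate dashes, strip edge dashes) with one pass that collects maximal alphanumeric runs as tokens and joins them with '-'.
import Mathlib
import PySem

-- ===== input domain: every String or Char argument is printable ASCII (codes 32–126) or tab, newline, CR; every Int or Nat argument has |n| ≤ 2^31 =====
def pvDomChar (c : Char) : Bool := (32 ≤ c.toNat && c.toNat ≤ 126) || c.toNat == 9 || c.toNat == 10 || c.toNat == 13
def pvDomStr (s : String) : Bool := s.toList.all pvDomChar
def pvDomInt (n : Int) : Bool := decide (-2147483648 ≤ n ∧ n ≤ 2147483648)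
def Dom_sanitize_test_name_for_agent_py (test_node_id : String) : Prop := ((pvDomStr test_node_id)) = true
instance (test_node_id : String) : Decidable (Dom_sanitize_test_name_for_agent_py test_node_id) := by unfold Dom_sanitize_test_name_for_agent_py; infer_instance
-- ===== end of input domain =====

-- B replaces A's three sequential passes (map non-alnum to '-', collapse duplicate
-- dashes, strip edge dashes) with one pass collecting maximal alphanumeric runs
-- as tokens joined by '-' (objective: simpler).

-- ===== PORT A =====
def sanitize_test_name_for_agent_py (test_node_id : String) : String :=
  let parts := PySem.Chars.splitOn test_node_id.toList "::".toList
  let short_name : List Char :=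
    if parts ≠ [] then
      match PySem.List.pyGet? parts (-1) with
      | some p => p
      | none => test_node_id.toList   -- unreachable: parts is never empty
    else test_node_id.toList
  let cleaned : List Char := short_name.foldl
    (fun acc ch => if PySem.Chars.isalnum ch || ch == '-' then acc ++ [ch] else acc ++ ['-']) []
  let sanitized : List Char := cleaned.foldl
    (fun acc ch => if ch == '-' && PySem.Chars.endswith acc ['-'] then acc else acc ++ [ch]) []
  String.ofList (PySem.List.slice (PySem.Chars.lower (PySem.Chars.stripChars sanitized ['-'])) none (some 40))

-- ===== PORT B =====
def sanitize_test_name_for_agent_py_alt (test_node_id : String) : String :=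
  let short_name : List Char :=
    (PySem.List.pyGet? (PySem.Chars.splitOn test_node_id.toList "::".toList) (-1)).getD []
  let st : List (List Char) × List Char := short_name.foldl
    (fun st ch =>
      if PySem.Chars.isalnum ch then (st.1, st.2 ++ [ch])
      else if st.2 ≠ [] then (st.1 ++ [st.2], []) else (st.1, []))
    ([], [])
  let tokens : List (List Char) := if st.2 ≠ [] then st.1 ++ [st.2] else st.1
  String.ofList (PySem.List.slice (PySem.Chars.lower (PySem.Chars.join ['-'] tokens)) none (some 40))

-- ===== PRECONDITION & SPEC =====
def Spec_sanitize_test_name_for_agent_py (test_node_id : String) (out : String) : Prop := out = sanitize_test_name_for_agent_py_alt test_node_id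
instance (test_node_id : String) (out : String) : Decidable (Spec_sanitize_test_name_for_agent_py test_node_id out) := by unfold Spec_sanitize_test_name_for_agent_py; infer_instance

-- ===== CLAIM (what is proved, stated in full; the proofs are below) =====
def Claim_equal_sanitize_test_name_for_agent_py : Prop := ∀ (test_node_id : String), Dom_sanitize_test_name_for_agent_py test_node_id → Spec_sanitize_test_name_for_agent_py test_node_id (sanitize_test_name_for_agent_py test_node_id)

-- ===== LEMMAS AND PROOFS =====

-- A's eager dash-writer: d = "a dash was just written / is being suppressed".
def pvF : Bool → List Char → List Char
  | _, [] => []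
  | d, c :: cs =>
    if PySem.Chars.isalnum c then c :: pvF false cs
    else if d then pvF true cs else '-' :: pvF true cs

-- Canonical form: st = "some alnum char already emitted", p = "separator pending".
def pvK : Bool → Bool → List Char → List Char
  | _, _, [] => []
  | st, p, c :: cs =>
    if PySem.Chars.isalnum c then
      (if st && p then '-' :: c :: pvK true false cs else c :: pvK true false cs)
    else pvK st true cs

-- B's tokenizer as a structural recursion.
def pvTok : List Char → List Char → List (List Char)
  | cur, [] => if cur ≠ [] then [cur] else []
  | cur, c :: cs =>
    if PySem.Chars.isalnum c then pvTok (cur ++ [c]) cs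
    else if cur ≠ [] then cur :: pvTok [] cs else pvTok [] cs

-- the single trailing dash pvF leaves when the input ends in a separator
def pvTrail (s : List Char) : List Char :=
  if s.getLast?.any (fun c => !PySem.Chars.isalnum c) then ['-'] else []

lemma pv_alnum_ne_dash {c : Char} (h : PySem.Chars.isalnum c = true) : (c == '-') = false := by
  cases hcd : (c == '-') with
  | false => rfl
  | true =>
    have : c = '-' := by simpa using hcd
    subst this
    exact absurd h (by decide)

lemma pvF_alnum (d : Bool) (c : Char) (cs : List Char) (h : PySem.Chars.isalnum c = true) :
    pvF d (c :: cs) = c :: pvF false cs := by simp [pvF, h]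

lemma pvF_sep_false (c : Char) (cs : List Char) (h : PySem.Chars.isalnum c = false) :
    pvF false (c :: cs) = '-' :: pvF true cs := by simp [pvF, h]

lemma pvF_sep_true (c : Char) (cs : List Char) (h : PySem.Chars.isalnum c = false) :
    pvF true (c :: cs) = pvF true cs := by simp [pvF, h]

lemma pvK_alnum (st p : Bool) (c : Char) (cs : List Char) (h : PySem.Chars.isalnum c = true) :
    pvK st p (c :: cs) = if st && p then '-' :: c :: pvK true false cs
      else c :: pvK true false cs := by simp [pvK, h]

lemma pvK_sep (st p : Bool) (c : Char) (cs : List Char) (h : PySem.Chars.isalnum c = false) :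
    pvK st p (c :: cs) = pvK st true cs := by simp [pvK, h]

lemma pvTok_alnum (cur : List Char) (c : Char) (cs : List Char)
    (h : PySem.Chars.isalnum c = true) :
    pvTok cur (c :: cs) = pvTok (cur ++ [c]) cs := by simp [pvTok, h]

lemma pvTok_sep (cur : List Char) (c : Char) (cs : List Char)
    (h : PySem.Chars.isalnum c = false) (hc : cur ≠ []) :
    pvTok cur (c :: cs) = cur :: pvTok [] cs := by simp [pvTok, h, hc]

lemma pvTok_sep_nil (c : Char) (cs : List Char) (h : PySem.Chars.isalnum c = false) :
    pvTok [] (c :: cs) = pvTok [] cs := by simp [pvTok, h]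

lemma pv_endswith_concat (acc : List Char) (c : Char) :
    PySem.Chars.endswith (acc ++ [c]) ['-'] = (c == '-') := by
  have h1 : (acc ++ [c]).reverse = c :: acc.reverse := by simp
  show List.isSuffixOf ['-'] (acc ++ [c]) = (c == '-')
  unfold List.isSuffixOf
  rw [h1]
  show (('-' == c) && List.isPrefixOf [] acc.reverse) = (c == '-')
  cases hcd : (c == '-') with
  | true =>
    have : c = '-' := by simpa using hcd
    subst this; rfl
  | false =>
    have hne : c ≠ '-' := by simpa using hcd
    have h2 : (('-' : Char) == c) = false := beq_eq_false_iff_ne.mpr (Ne.symm hne)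
    simp [h2]

lemma pv_clean_foldl (s : List Char) (acc : List Char) :
    s.foldl (fun acc ch => if PySem.Chars.isalnum ch || ch == '-' then acc ++ [ch] else acc ++ ['-']) acc
      = acc ++ s.map (fun ch => if PySem.Chars.isalnum ch || ch == '-' then ch else '-') := by
  induction s generalizing acc with
  | nil => simp
  | cons c cs ih =>
    simp only [List.foldl_cons, List.map_cons]
    rw [ih]
    by_cases h : (PySem.Chars.isalnum c || c == '-') = true <;> simp [h]

lemma pv_collapse_foldl (s : List Char) (acc : List Char) :
    (s.map (fun ch => if PySem.Chars.isalnum ch || ch == '-' then ch else '-')).foldl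
        (fun acc ch => if ch == '-' && PySem.Chars.endswith acc ['-'] then acc else acc ++ [ch]) acc
      = acc ++ pvF (PySem.Chars.endswith acc ['-']) s := by
  induction s generalizing acc with
  | nil => simp [pvF]
  | cons c cs ih =>
    simp only [List.map_cons, List.foldl_cons]
    by_cases ha : PySem.Chars.isalnum c = true
    · have hd := pv_alnum_ne_dash ha
      have hrepl : (if (PySem.Chars.isalnum c || c == '-') = true then c else '-') = c := by
        simp [ha]
      rw [hrepl, if_neg (by simp [hd]), ih (acc ++ [c]), pv_endswith_concat, hd]
      simp [pvF, ha]
    · have hrepl : (if (PySem.Chars.isalnum c || c == '-') = true then c else '-') = '-' := by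
        cases hc : (c == '-') with
        | true => simpa using hc
        | false => simp [ha]
      rw [hrepl]
      cases he : PySem.Chars.endswith acc ['-'] with
      | true =>
        rw [if_pos (by simp), ih acc, he]
        simp [pvF, ha]
      | false =>
        rw [if_neg (by simp), ih (acc ++ ['-']), pv_endswith_concat]
        simp [pvF, ha]

lemma pvK_false_pend (s : List Char) (p : Bool) : pvK false p s = pvK false false s := by
  induction s generalizing p with
  | nil => rfl
  | cons c cs ih => by_cases ha : PySem.Chars.isalnum c = true <;> simp [pvK, ha, ih]

lemma pvK_true_true (s : List Char) :
    pvK true true s = (if s.any PySem.Chars.isalnum then ['-'] else []) ++ pvK false false s := by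
  induction s with
  | nil => simp [pvK]
  | cons c cs ih =>
    by_cases ha : PySem.Chars.isalnum c = true <;>
      simp [pvK, ha, ih, pvK_false_pend, List.any_cons]

lemma pvK_true_false (s : List Char) :
    pvK true false s =
      (if (match s with | [] => false | c :: _ => !PySem.Chars.isalnum c) && s.any PySem.Chars.isalnum
        then ['-'] else []) ++ pvK false false s := by
  cases s with
  | nil => simp [pvK]
  | cons c cs =>
    by_cases ha : PySem.Chars.isalnum c = true <;>
      simp [pvK, ha, pvK_true_true, pvK_false_pend, List.any_cons]

lemma pvF_true_no_alnum (s : List Char) (h : s.any PySem.Chars.isalnum = false) : pvF true s = [] := by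
  induction s with
  | nil => rfl
  | cons c cs ih =>
    simp only [List.any_cons, Bool.or_eq_false_iff] at h
    simp [pvF, h.1, ih h.2]

lemma pvK_nil_no_alnum (s : List Char) (st p : Bool) (h : s.any PySem.Chars.isalnum = false) :
    pvK st p s = [] := by
  induction s generalizing st p with
  | nil => rfl
  | cons c cs ih =>
    simp only [List.any_cons, Bool.or_eq_false_iff] at h
    simp [pvK, h.1, ih _ _ h.2]

lemma pvTrail_no_alnum (s : List Char) (hne : s ≠ []) (h : s.any PySem.Chars.isalnum = false) :
    pvTrail s = ['-'] := by
  cases hL : s.getLast? with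
  | none => exact absurd (List.getLast?_eq_none_iff.mp hL) hne
  | some c =>
    have hc : c ∈ s := List.mem_of_getLast? hL
    have : PySem.Chars.isalnum c = false := by
      by_contra hcc
      have : s.any PySem.Chars.isalnum = true :=
        List.any_eq_true.mpr ⟨c, hc, by simpa using hcc⟩
      simp [this] at h
    simp [pvTrail, hL, this]

lemma pvF_eq_pvK (s : List Char) :
    pvF false s = pvK true false s ++ pvTrail s ∧
    pvK true true s ++ pvTrail s
      = (if s.any PySem.Chars.isalnum then ['-'] else pvTrail s) ++ pvF true s := by
  induction s with
  | nil => exact ⟨rfl, by simp [pvF, pvK, pvTrail]⟩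
  | cons c cs ih =>
    obtain ⟨ihf, iht⟩ := ih
    by_cases ha : PySem.Chars.isalnum c = true
    · cases cs with
      | nil =>
        refine ⟨?_, ?_⟩
        · rw [pvF_alnum _ _ _ ha, pvK_alnum _ _ _ _ ha]
          simp [pvF, pvK, pvTrail, ha]
        · rw [pvK_alnum _ _ _ _ ha, pvF_alnum _ _ _ ha]
          simp [pvF, pvK, pvTrail, ha]
      | cons y ys =>
        have htr : pvTrail (c :: y :: ys) = pvTrail (y :: ys) := by
          simp [pvTrail, List.getLast?_cons_cons]
        have hany : (c :: y :: ys).any PySem.Chars.isalnum = true := by simp [ha]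
        refine ⟨?_, ?_⟩
        · rw [pvF_alnum _ _ _ ha, pvK_alnum _ _ _ _ ha, htr, ihf]
          simp
        · rw [pvK_alnum _ _ _ _ ha, pvF_alnum _ _ _ ha, htr, hany, ihf]
          simp
    · have ha' : PySem.Chars.isalnum c = false := by simpa using ha
      cases cs with
      | nil =>
        refine ⟨?_, ?_⟩
        · simp [pvF, pvK, pvTrail, ha']
        · simp [pvF, pvK, pvTrail, ha']
      | cons y ys =>
        have htr : pvTrail (c :: y :: ys) = pvTrail (y :: ys) := by
          simp [pvTrail, List.getLast?_cons_cons]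
        have hanyc : (c :: y :: ys).any PySem.Chars.isalnum
            = (y :: ys).any PySem.Chars.isalnum := by simp [ha']
        refine ⟨?_, ?_⟩
        · rw [pvF_sep_false _ _ ha', pvK_sep _ _ _ _ ha', htr, iht]
          cases hy : (y :: ys).any PySem.Chars.isalnum with
          | true => simp
          | false =>
            simp [pvF_true_no_alnum _ hy, pvTrail_no_alnum (y :: ys) (by simp) hy]
        · rw [pvK_sep _ _ _ _ ha', pvF_sep_true _ _ ha', htr, hanyc]
          exact iht

lemma pvK_head_alnum (s : List Char) (p : Bool) :
    ((pvK false p s).head?.all PySem.Chars.isalnum) = true := by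
  induction s generalizing p with
  | nil => rfl
  | cons c cs ih =>
    by_cases ha : PySem.Chars.isalnum c = true
    · simp [pvK, ha]
    · simp only [pvK, ha, Bool.false_eq_true, if_false]
      exact ih _

lemma pvK_last_alnum (s : List Char) (st p : Bool) :
    ((pvK st p s).getLast?.all PySem.Chars.isalnum) = true := by
  induction s generalizing st p with
  | nil => rfl
  | cons c cs ih =>
    by_cases ha : PySem.Chars.isalnum c = true
    · have hr := ih true false
      cases hrn : pvK true false cs with
      | nil => cases hstp : st && p <;> simp [pvK, ha, hstp, hrn]
      | cons d ds =>
        rw [hrn] at hr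
        cases hstp : st && p <;>
          simp [pvK, ha, hstp, hrn, List.getLast?_cons_cons, hr]
    · simp only [pvK, ha, Bool.false_eq_true, if_false]
      exact ih _ _

lemma pvK_ne_nil_of_any (s : List Char) (p : Bool) (h : s.any PySem.Chars.isalnum = true) :
    pvK false p s ≠ [] := by
  induction s generalizing p with
  | nil => simp at h
  | cons c cs ih =>
    by_cases ha : PySem.Chars.isalnum c = true
    · simp [pvK, ha]
    · simp only [List.any_cons, ha, Bool.false_or] at h
      simp only [pvK, ha, Bool.false_eq_true, if_false]
      exact ih _ h

lemma pv_strip (m : List Char) (b1 b2 : Bool) (hne : m ≠ [])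
    (hh : (m.head?.all PySem.Chars.isalnum) = true)
    (hl : (m.getLast?.all PySem.Chars.isalnum) = true) :
    PySem.Chars.stripChars ((if b1 then ['-'] else []) ++ m ++ (if b2 then ['-'] else [])) ['-'] = m := by
  obtain ⟨ch, m', rfl⟩ : ∃ ch m', m = ch :: m' := by
    cases m with
    | nil => exact absurd rfl hne
    | cons a b => exact ⟨a, b, rfl⟩
  have hch : PySem.Chars.isalnum ch = true := by simpa using hh
  have hchne : ch ≠ '-' := by
    intro e; rw [e] at hch; exact absurd hch (by decide)
  obtain ⟨cl, hcl⟩ : ∃ cl, (ch :: m').getLast? = some cl := by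
    cases hq : (ch :: m').getLast? with
    | none => exact absurd (List.getLast?_eq_none_iff.mp hq) (by simp)
    | some x => exact ⟨x, rfl⟩
  have hcla : PySem.Chars.isalnum cl = true := by
    rw [hcl] at hl; simpa using hl
  have hclne : cl ≠ '-' := by
    intro e; rw [e] at hcla; exact absurd hcla (by decide)
  obtain ⟨d, mr, hmr⟩ : ∃ d mr, (ch :: m').reverse = d :: mr := by
    cases hq : (ch :: m').reverse with
    | nil => exact absurd (List.reverse_eq_nil_iff.mp hq) (by simp)
    | cons a b => exact ⟨a, b, rfl⟩
  have hd : d = cl := by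
    have h3 := List.head?_reverse (l := ch :: m')
    rw [hmr, hcl] at h3
    simpa using h3
  subst hd
  have hmr' : m'.reverse ++ [ch] = d :: mr := by
    rw [← List.reverse_cons]; exact hmr
  have hinner : List.dropWhile (fun c => (['-'] : List Char).contains c)
      ((if b1 then ['-'] else []) ++ (ch :: m') ++ (if b2 then ['-'] else []))
      = (ch :: m') ++ (if b2 then ['-'] else []) := by
    cases b1 <;> simp [hchne]
  have houter : List.dropWhile (fun c => (['-'] : List Char).contains c)
      ((ch :: m') ++ (if b2 then ['-'] else [])).reverse = (ch :: m').reverse := by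
    cases b2 <;> simp [List.reverse_append, hmr', hclne]
  simp only [PySem.Chars.stripChars, hinner, houter, List.reverse_reverse]

-- A's sanitizing core equals the canonical form.
lemma pvA_core (s : List Char) :
    PySem.Chars.stripChars (pvF false s) ['-'] = pvK false false s := by
  have hPf := (pvF_eq_pvK s).1
  rw [hPf, pvK_true_false]
  by_cases hany : s.any PySem.Chars.isalnum = true
  · have hne := pvK_ne_nil_of_any s false hany
    rw [pvTrail]
    exact pv_strip _ _ _ hne (pvK_head_alnum s false) (pvK_last_alnum s false false)
  · have hf : s.any PySem.Chars.isalnum = false := by simpa using hany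
    rw [pvK_nil_no_alnum s false false hf]
    cases s with
    | nil => simp [pvTrail, PySem.Chars.stripChars]
    | cons x xs =>
      rw [pvTrail_no_alnum _ (by simp) hf]
      simp [hf, PySem.Chars.stripChars, List.dropWhile]

lemma pvTok_ne_nil (s : List Char) (cur : List Char) (h : cur ≠ []) : pvTok cur s ≠ [] := by
  induction s generalizing cur with
  | nil => simp [pvTok, h]
  | cons c cs ih =>
    by_cases ha : PySem.Chars.isalnum c = true
    · simp only [pvTok, ha, if_true]
      exact ih _ (by simp)
    · simp [pvTok, ha, h]

lemma pv_tok_foldl (s : List Char) (acc : List (List Char)) (cur : List Char) :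
    (let r := s.foldl
        (fun st ch =>
          if PySem.Chars.isalnum ch then (st.1, st.2 ++ [ch])
          else if st.2 ≠ [] then (st.1 ++ [st.2], []) else (st.1, []))
        (acc, cur);
      if r.2 ≠ [] then r.1 ++ [r.2] else r.1) = acc ++ pvTok cur s := by
  induction s generalizing acc cur with
  | nil => by_cases hc : cur = [] <;> simp [pvTok, hc]
  | cons c cs ih =>
    by_cases ha : PySem.Chars.isalnum c = true
    · simpa [pvTok, ha] using ih acc (cur ++ [c])
    · by_cases hc : cur = []
      · simpa [pvTok, ha, hc] using ih acc []
      · simpa [pvTok, ha, hc] using ih (acc ++ [cur]) []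

lemma pv_intercalate_cons₂ (x y : List Char) (l : List (List Char)) :
    List.intercalate ['-'] (x :: y :: l) = x ++ '-' :: List.intercalate ['-'] (y :: l) := by
  simp [List.intercalate, List.intersperse]

lemma pv_join_pvTok (s : List Char) :
    (∀ cur, cur ≠ [] → PySem.Chars.join ['-'] (pvTok cur s) = cur ++ pvK true false s) ∧
    (if pvTok [] s = [] then [] else '-' :: PySem.Chars.join ['-'] (pvTok [] s)) = pvK true true s := by
  induction s with
  | nil =>
    refine ⟨fun cur h => ?_, ?_⟩
    · rw [show pvTok cur [] = [cur] from by simp [pvTok, h]]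
      simp [PySem.Chars.join, List.intercalate, pvK]
    · simp [pvTok, pvK]
  | cons c cs ih =>
    obtain ⟨ih1, ih2⟩ := ih
    by_cases ha : PySem.Chars.isalnum c = true
    · refine ⟨fun cur hc => ?_, ?_⟩
      · rw [pvTok_alnum _ _ _ ha, ih1 (cur ++ [c]) (by simp), pvK_alnum _ _ _ _ ha]
        simp
      · have ht := pvTok_ne_nil cs [c] (by simp)
        rw [pvTok_alnum _ _ _ ha, show ([] : List Char) ++ [c] = [c] from rfl, if_neg ht,
          ih1 [c] (by simp), pvK_alnum _ _ _ _ ha]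
        simp
    · have ha' : PySem.Chars.isalnum c = false := by simpa using ha
      refine ⟨fun cur hc => ?_, ?_⟩
      · rw [pvTok_sep _ _ _ ha' hc, pvK_sep _ _ _ _ ha', ← ih2]
        cases ht : pvTok [] cs with
        | nil => simp [PySem.Chars.join, List.intercalate]
        | cons y l =>
          simp only [PySem.Chars.join]
          rw [pv_intercalate_cons₂]
          simp
      · rw [pvTok_sep_nil _ _ ha', pvK_sep _ _ _ _ ha']
        exact ih2

-- B's tokenizing core equals the canonical form.
lemma pvB_core (s : List Char) :
    PySem.Chars.join ['-'] (pvTok [] s) = pvK false false s := by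
  induction s with
  | nil => simp [pvTok, pvK, PySem.Chars.join, List.intercalate]
  | cons c cs ih =>
    by_cases ha : PySem.Chars.isalnum c = true
    · rw [pvTok_alnum _ _ _ ha, show ([] : List Char) ++ [c] = [c] from rfl,
        (pv_join_pvTok cs).1 [c] (by simp), pvK_alnum _ _ _ _ ha]
      simp
    · have ha' : PySem.Chars.isalnum c = false := by simpa using ha
      rw [pvTok_sep_nil _ _ ha', ih, pvK_sep _ _ _ _ ha']
      exact (pvK_false_pend cs true).symm

lemma pv_splitOn_go_ne_nil (sep : List Char) (fuel : Nat) (l cur : List Char)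
    (acc : List (List Char)) : PySem.Chars.splitOn.go sep fuel l cur acc ≠ [] := by
  induction fuel generalizing l cur acc with
  | zero => simp [PySem.Chars.splitOn.go]
  | succ n ih =>
    cases l with
    | nil => simp [PySem.Chars.splitOn.go]
    | cons c rest =>
      rw [PySem.Chars.splitOn.go]
      split
      · exact ih _ _ _
      · exact ih _ _ _

lemma pv_pyGet_neg_one (xs : List (List Char)) (h : xs ≠ []) :
    ∃ v, PySem.List.pyGet? xs (-1) = some v := by
  have hlen : 0 < xs.length := List.length_pos_of_ne_nil h
  have h1 : PySem.List.pyIdx? xs.length (-1) = some (xs.length - 1) := by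
    simp only [PySem.List.pyIdx?]
    rw [if_neg (by omega), if_pos (by omega)]
    norm_num
  have hlt : xs.length - 1 < xs.length := by omega
  refine ⟨xs[xs.length - 1], ?_⟩
  simp [PySem.List.pyGet?, h1, List.getElem?_eq_getElem hlt]

-- ===== VERDICT (by name: the statement is the Claim_ definition above) =====
theorem sanitize_test_name_for_agent_py_spec : Claim_equal_sanitize_test_name_for_agent_py := by
  intro t _
  unfold Spec_sanitize_test_name_for_agent_py
  unfold sanitize_test_name_for_agent_py sanitize_test_name_for_agent_py_alt
  have hne : PySem.Chars.splitOn t.toList "::".toList ≠ [] := by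
    rw [PySem.Chars.splitOn]
    exact pv_splitOn_go_ne_nil _ _ _ _ _
  obtain ⟨v, hv⟩ := pv_pyGet_neg_one _ hne
  simp only [hne, hv, ne_eq, not_false_iff, Option.getD_some, if_pos]
  have hA : (v.foldl
      (fun acc ch => if PySem.Chars.isalnum ch || ch == '-' then acc ++ [ch] else acc ++ ['-'])
      []).foldl
      (fun acc ch => if ch == '-' && PySem.Chars.endswith acc ['-'] then acc else acc ++ [ch]) []
      = pvF false v := by
    rw [pv_clean_foldl, List.nil_append, pv_collapse_foldl, List.nil_append]
    have : PySem.Chars.endswith ([] : List Char) ['-'] = false := by decide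
    rw [this]
  have hB := pv_tok_foldl v [] []
  simp only [List.nil_append] at hB
  rw [hA, pvA_core, hB, pvB_core]
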